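-- pv_equiv track=rewrite | github.com/awwalm/DSAlgoPy | Goodrich/Chapter13/Utilities/LCS/lcs_cet.py | TP_LCS
-- ===== SOURCE A (Python) =====
-- def TP_LCS(A: str, B: str):
--     lcs1, lcs2 = [], []
--     def scan_match(J, K, a, b, lcs):
--         for j in range(J, len(a)):
--             for k in range(K, len(b)):
--                 if a[j] == b[k]:
--                     lcs.append(a[j])
--                     return scan_match(j+1, k+1, a, b, lcs)
--     scan_match(0, 0, A, B, lcs1)
--     scan_match(0, 0, B, A, lcs2)
--     return lcs1 if len(lcs1) > len(lcs2) else lcs2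
-- ===== SOURCE B (Python) =====
-- def TP_LCS(A: str, B: str):
--     def greedy(a, b):
--         # next-occurrence tables: nxt[k] maps char -> smallest index >= k in b
--         nxt = [dict() for _ in range(len(b) + 1)]
--         for k in range(len(b) - 1, -1, -1):
--             t = dict(nxt[k + 1])
--             t[b[k]] = k
--             nxt[k] = t
--         out = []
--         K = 0
--         for ch in a:
--             k = nxt[K].get(ch)
--             if k is not None:
--                 out.append(ch)
--                 K = k + 1
--         return out
--     r1 = greedy(A, B)
--     r2 = greedy(B, A)
--     return r1 if len(r1) > len(r2) else r2
-- ===== Notes on version B (the rewrite author's own statement) =====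
-- stated objective: faster
-- what changed: Replaces A's nested rescans of b (recursive scan_match with an inner linear search restarting at K for every j) by a precomputed per-position next-occurrence table for b, so the greedy scan over a does O(1) dictionary lookups instead of an inner scan.
import Mathlib
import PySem

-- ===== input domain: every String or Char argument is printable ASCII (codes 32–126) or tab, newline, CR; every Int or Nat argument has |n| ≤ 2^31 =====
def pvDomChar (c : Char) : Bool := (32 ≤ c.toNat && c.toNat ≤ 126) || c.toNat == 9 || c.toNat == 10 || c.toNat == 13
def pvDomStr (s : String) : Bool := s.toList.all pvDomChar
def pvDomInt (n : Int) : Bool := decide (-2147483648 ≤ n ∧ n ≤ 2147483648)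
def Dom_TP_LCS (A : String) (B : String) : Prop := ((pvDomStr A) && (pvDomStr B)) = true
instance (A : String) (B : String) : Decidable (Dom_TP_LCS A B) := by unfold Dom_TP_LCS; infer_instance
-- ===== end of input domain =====

-- B replaces A's inner rescan of b by a precomputed next-occurrence table (faster greedy scan); same return value.

-- ===== PORT A =====
-- inner `for k in range(K, len(b)): if a[j] == b[k]` — first match index, or none
def pvInnerScan (K : Nat) (b : List Char) (c : Char) : Option Nat :=
  if h : K < b.length then
    if b[K] = c then some K else pvInnerScan (K + 1) b c
  else none
termination_by b.length - K

-- `scan_match(J, K, a, b, lcs)`: outer loop over j, recursing on a match (j+1, k+1); K unchanged when no match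
def pvScanMatch (J K : Nat) (a b : List Char) (lcs : List String) : List String :=
  if h : J < a.length then
    match pvInnerScan K b a[J] with
    | some k => pvScanMatch (J + 1) (k + 1) a b (lcs ++ [String.ofList [a[J]]])
    | none => pvScanMatch (J + 1) K a b lcs
  else lcs
termination_by a.length - J

def TP_LCS (A : String) (B : String) : List String :=
  let lcs1 := pvScanMatch 0 0 A.toList B.toList []
  let lcs2 := pvScanMatch 0 0 B.toList A.toList []
  if lcs1.length > lcs2.length then lcs1 else lcs2

-- ===== PORT B =====
-- tables nxt[k] for k = K0 .. len b : char ↦ smallest index ≥ k with b[index] = char, built back to front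
def pvNxtTables (b : List Char) (K0 : Nat) : List (PySem.Dict Char Nat) :=
  if h : K0 < b.length then
    let rest := pvNxtTables b (K0 + 1)
    (PySem.Dict.insert (rest.headD PySem.Dict.empty) b[K0] K0) :: rest
  else [PySem.Dict.empty]
termination_by b.length - K0

-- greedy scan over a with current position K into b, O(1) table lookup per character
def pvGreedy (a : List Char) (nxt : List (PySem.Dict Char Nat)) (K : Nat) (out : List String) : List String :=
  match a with
  | [] => out
  | c :: rest =>
    match (nxt.getD K PySem.Dict.empty).get? c with
    | some k => pvGreedy rest nxt (k + 1) (out ++ [String.ofList [c]])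
    | none => pvGreedy rest nxt K out

def TP_LCS_alt (A : String) (B : String) : List String :=
  let r1 := pvGreedy A.toList (pvNxtTables B.toList 0) 0 []
  let r2 := pvGreedy B.toList (pvNxtTables A.toList 0) 0 []
  if r1.length > r2.length then r1 else r2

-- ===== PRECONDITION & SPEC =====
def Spec_TP_LCS (A : String) (B : String) (out : List String) : Prop := out = TP_LCS_alt A B
instance (A : String) (B : String) (out : List String) : Decidable (Spec_TP_LCS A B out) := by unfold Spec_TP_LCS; infer_instance

-- ===== CLAIM (what is proved, stated in full; the proofs are below) =====
def Claim_equal_TP_LCS : Prop := ∀ (A : String) (B : String), Dom_TP_LCS A B → Spec_TP_LCS A B (TP_LCS A B)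

-- ===== LEMMAS AND PROOFS =====

-- headD is getD 0
theorem pv_headD_eq_getD {α : Type} (l : List α) (d : α) : l.headD d = l.getD 0 d := by
  cases l <;> simp

-- the table at offset i of pvNxtTables b K0 answers exactly the inner scan from K0 + i
theorem pvNxt_lookup (b : List Char) (c : Char) :
    ∀ K0 i, K0 + i ≤ b.length →
      ((pvNxtTables b K0).getD i PySem.Dict.empty).get? c = pvInnerScan (K0 + i) b c := by
  have main : ∀ n K0 i, b.length - K0 ≤ n → K0 + i ≤ b.length →
      ((pvNxtTables b K0).getD i PySem.Dict.empty).get? c = pvInnerScan (K0 + i) b c := by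
    intro n
    induction n with
    | zero =>
      intro K0 i hn hi
      have hK : b.length ≤ K0 := by omega
      have hi0 : i = 0 := by omega
      have hK0 : K0 = b.length := by omega
      subst hi0
      rw [pvNxtTables, pvInnerScan]
      simp [hK0]
    | succ n ih =>
      intro K0 i hn hi
      by_cases h : K0 < b.length
      · rw [pvNxtTables]
        simp only [h, dif_pos]
        cases i with
        | zero =>
          simp only [List.getD_cons_zero]
          rw [PySem.Dict.get?_insert]
          rw [pvInnerScan]
          simp only [Nat.add_zero, h, dif_pos]
          by_cases hc : b[K0] = c
          · simp [hc]
          · have hc' : ¬ c = b[K0] := fun h' => hc h'.symm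
            simp only [hc, if_false, hc', if_false]
            have := ih (K0 + 1) 0 (by omega) (by omega)
            rw [pv_headD_eq_getD]
            simpa using this
        | succ i' =>
          simp only [List.getD_cons_succ]
          have := ih (K0 + 1) i' (by omega) (by omega)
          have harith : K0 + 1 + i' = K0 + (i' + 1) := by omega
          rw [harith] at this
          exact this
      · have hK0 : K0 = b.length := by omega
        have hi0 : i = 0 := by omega
        subst hi0
        rw [pvNxtTables, pvInnerScan]
        simp [hK0]
  intro K0 i hi
  exact main (b.length - K0) K0 i le_rfl hi

-- a successful inner scan returns an in-range index
theorem pvInnerScan_lt (b : List Char) (c : Char) :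
    ∀ K k, pvInnerScan K b c = some k → k < b.length := by
  have main : ∀ n K k, b.length - K ≤ n → pvInnerScan K b c = some k → k < b.length := by
    intro n
    induction n with
    | zero =>
      intro K k hn h
      rw [pvInnerScan] at h
      have : ¬ K < b.length := by omega
      simp [this] at h
    | succ n ih =>
      intro K k hn h
      rw [pvInnerScan] at h
      by_cases hK : K < b.length
      · simp only [hK, dif_pos] at h
        by_cases hc : b[K] = c
        · simp [hc] at h; omega
        · simp only [hc, if_false] at h
          exact ih (K + 1) k (by omega) h
      · simp [hK] at h
  intro K k h
  exact main (b.length - K) K k le_rfl h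

-- the greedy scan with the table equals A's outer loop
theorem pvGreedy_eq (a b : List Char) :
    ∀ J K lcs, K ≤ b.length →
      pvScanMatch J K a b lcs = pvGreedy (a.drop J) (pvNxtTables b 0) K lcs := by
  have main : ∀ n J K lcs, a.length - J ≤ n → K ≤ b.length →
      pvScanMatch J K a b lcs = pvGreedy (a.drop J) (pvNxtTables b 0) K lcs := by
    intro n
    induction n with
    | zero =>
      intro J K lcs hn hK
      have hJ : a.length ≤ J := by omega
      rw [pvScanMatch, List.drop_eq_nil_of_le hJ]
      have : ¬ J < a.length := by omega
      simp [this, pvGreedy]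
    | succ n ih =>
      intro J K lcs hn hK
      by_cases hJ : J < a.length
      · rw [pvScanMatch]
        simp only [hJ, dif_pos]
        rw [List.drop_eq_getElem_cons hJ, pvGreedy]
        have hlook := pvNxt_lookup b a[J] 0 K (by omega)
        simp only [Nat.zero_add] at hlook
        rw [hlook]
        cases hscan : pvInnerScan K b a[J] with
        | none => exact ih (J + 1) K lcs (by omega) hK
        | some k =>
          have hk := pvInnerScan_lt b a[J] K k hscan
          exact ih (J + 1) (k + 1) (lcs ++ [String.ofList [a[J]]]) (by omega) (by omega)
      · rw [pvScanMatch, List.drop_eq_nil_of_le (by omega)]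
        simp [hJ, pvGreedy]
  intro J K lcs hK
  exact main (a.length - J) J K lcs le_rfl hK

-- ===== VERDICT (by name: the statement is the Claim_ definition above) =====
theorem TP_LCS_spec : Claim_equal_TP_LCS := by
  intro A B _
  unfold Spec_TP_LCS TP_LCS TP_LCS_alt
  rw [pvGreedy_eq A.toList B.toList 0 0 [] (Nat.zero_le _),
      pvGreedy_eq B.toList A.toList 0 0 [] (Nat.zero_le _)]
  rfl
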